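-- pv_equiv track=rewrite | github.com/narwhals-2016/realtor | project/tables/dataframe.py | make_series_col
-- ===== SOURCE A (Python) =====
-- type_dict = {
-- 	'proportional':[
-- 		'age', 'gender', 'current_edu_level', 'highest_edu_level', 'number_of_units',
-- 		'building_age', 'ownership_type', 'number_of_rooms', 'number_of_vehicles',
-- 		'marital_status_checkbox',
-- 	],
-- 	'value':['income_level_range', 'price_range', 'commute_time_range'],
-- 	'high_score':['night_life_importance', 'school_level'],
-- 	'low_score':['noise_level_checkbox', 'crime_level_checkbox'],
-- }
--
-- def make_series_col(form_key):
-- 	for key in type_dict: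
-- 		if form_key in type_dict[key]:
-- 			if key == 'proportional':
-- 				return 100
-- 			elif key == 'low_score':
-- 				return 0
-- 			elif key == 'high_score':
-- 				if form_key == 'school_level':
-- 					return 5
-- 				elif form_key == 'night_life_importance':
-- 					return 10
-- ===== SOURCE B (Python) =====
-- _score_dict = {
-- 	'age': 100, 'gender': 100, 'current_edu_level': 100, 'highest_edu_level': 100,
-- 	'number_of_units': 100, 'building_age': 100, 'ownership_type': 100,
-- 	'number_of_rooms': 100, 'number_of_vehicles': 100, 'marital_status_checkbox': 100,
-- 	'school_level': 5, 'night_life_importance': 10,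
-- 	'noise_level_checkbox': 0, 'crime_level_checkbox': 0,
-- }
--
-- def make_series_col(form_key):
-- 	return _score_dict.get(form_key)
-- ===== Notes on version B (the rewrite author's own statement) =====
-- stated objective: idiomatic
-- what changed: Replaced the category-loop with nested if/elif branches by a single precomputed key-to-score dict and one .get lookup; 'value'-category and unknown keys are simply absent, yielding None.
import Mathlib
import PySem

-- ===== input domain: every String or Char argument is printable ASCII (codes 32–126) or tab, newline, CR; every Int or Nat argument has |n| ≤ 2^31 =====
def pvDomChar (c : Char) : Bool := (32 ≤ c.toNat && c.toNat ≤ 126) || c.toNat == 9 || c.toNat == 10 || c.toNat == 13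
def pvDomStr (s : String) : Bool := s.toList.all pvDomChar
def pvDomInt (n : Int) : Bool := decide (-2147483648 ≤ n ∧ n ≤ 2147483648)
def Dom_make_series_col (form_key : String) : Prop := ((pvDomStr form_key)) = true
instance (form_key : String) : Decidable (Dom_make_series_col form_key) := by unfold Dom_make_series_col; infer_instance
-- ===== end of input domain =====

-- B replaces A's category loop + nested branch cascade by one flat key→score dict and a single lookup (idiomatic).

-- ===== PORT A =====
def typeDict : List (String × List String) :=
  [("proportional", ["age", "gender", "current_edu_level", "highest_edu_level", "number_of_units", "building_age", "ownership_type", "number_of_rooms", "number_of_vehicles", "marital_status_checkbox"]),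
   ("value", ["income_level_range", "price_range", "commute_time_range"]),
   ("high_score", ["night_life_importance", "school_level"]),
   ("low_score", ["noise_level_checkbox", "crime_level_checkbox"])]

-- the 'for key in type_dict' loop, step for step; a branch that matches nothing continues the loop
def loopA : List (String × List String) → String → Option Int
  | [], _ => none
  | (key, vals) :: rest, fk =>
    if vals.contains fk then
      if key == "proportional" then some 100
      else if key == "low_score" then some 0
      else if key == "high_score" then
        if fk == "school_level" then some 5
        else if fk == "night_life_importance" then some 10
        else loopA rest fk
      else loopA rest fk
    else loopA rest fk

def make_series_col (form_key : String) : Option Int :=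
  loopA typeDict form_key

-- ===== PORT B =====
def scoreDict : PySem.Dict String Int :=
  PySem.Dict.ofList [("age", 100), ("gender", 100), ("current_edu_level", 100), ("highest_edu_level", 100), ("number_of_units", 100), ("building_age", 100), ("ownership_type", 100), ("number_of_rooms", 100), ("number_of_vehicles", 100), ("marital_status_checkbox", 100), ("school_level", 5), ("night_life_importance", 10), ("noise_level_checkbox", 0), ("crime_level_checkbox", 0)]

def make_series_col_alt (form_key : String) : Option Int :=
  scoreDict.get? form_key

-- ===== PRECONDITION & SPEC =====
def Spec_make_series_col (form_key : String) (out : Option Int) : Prop := out = make_series_col_alt form_key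
instance (form_key : String) (out : Option Int) : Decidable (Spec_make_series_col form_key out) := by unfold Spec_make_series_col; infer_instance

-- ===== CLAIM (what is proved, stated in full; the proofs are below) =====
def Claim_equal_make_series_col : Prop := ∀ (form_key : String), Dom_make_series_col form_key → Spec_make_series_col form_key (make_series_col form_key)

-- ===== LEMMAS AND PROOFS =====

theorem pvBeqComm (a b : String) : (a == b) = (b == a) := by
  by_cases h : a = b
  · subst h; rfl
  · rw [beq_eq_false_iff_ne.mpr h, beq_eq_false_iff_ne.mpr (Ne.symm h)]

-- literal category-key comparisons of A's dispatch, evaluated once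
theorem kc_pp : ("proportional" == "proportional") = true := by decide
theorem kc_vp : ("value" == "proportional") = false := by decide
theorem kc_vl : ("value" == "low_score") = false := by decide
theorem kc_vh : ("value" == "high_score") = false := by decide
theorem kc_hp : ("high_score" == "proportional") = false := by decide
theorem kc_hl : ("high_score" == "low_score") = false := by decide
theorem kc_hh : ("high_score" == "high_score") = true := by decide
theorem kc_lp : ("low_score" == "proportional") = false := by decide
theorem kc_ll : ("low_score" == "low_score") = true := by decide

-- A's loop over typeDict, with the category dispatch already resolved
def chainA (form_key : String) : Option Int :=
  if (["age", "gender", "current_edu_level", "highest_edu_level", "number_of_units", "building_age", "ownership_type", "number_of_rooms", "number_of_vehicles", "marital_status_checkbox"] : List String).contains form_key then some 100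
  else if (["night_life_importance", "school_level"] : List String).contains form_key then
    (if form_key == "school_level" then some 5
     else if form_key == "night_life_importance" then some 10
     else if (["noise_level_checkbox", "crime_level_checkbox"] : List String).contains form_key then some 0
     else none)
  else if (["noise_level_checkbox", "crime_level_checkbox"] : List String).contains form_key then some 0
  else none

-- B's dict lookup as an if-chain over the keys, query-first orientation
def chainB (form_key : String) : Option Int :=
  if form_key == "age" then some (100 : Int) else
  if form_key == "gender" then some (100 : Int) else
  if form_key == "current_edu_level" then some (100 : Int) else
  if form_key == "highest_edu_level" then some (100 : Int) else
  if form_key == "number_of_units" then some (100 : Int) else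
  if form_key == "building_age" then some (100 : Int) else
  if form_key == "ownership_type" then some (100 : Int) else
  if form_key == "number_of_rooms" then some (100 : Int) else
  if form_key == "number_of_vehicles" then some (100 : Int) else
  if form_key == "marital_status_checkbox" then some (100 : Int) else
  if form_key == "school_level" then some (5 : Int) else
  if form_key == "night_life_importance" then some (10 : Int) else
  if form_key == "noise_level_checkbox" then some (0 : Int) else
  if form_key == "crime_level_checkbox" then some (0 : Int) else
  none

theorem scoreDict_eq : scoreDict = PySem.Dict.mk [("age", 100), ("gender", 100), ("current_edu_level", 100), ("highest_edu_level", 100), ("number_of_units", 100), ("building_age", 100), ("ownership_type", 100), ("number_of_rooms", 100), ("number_of_vehicles", 100), ("marital_status_checkbox", 100), ("school_level", 5), ("night_life_importance", 10), ("noise_level_checkbox", 0), ("crime_level_checkbox", 0)] := by decide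

theorem a_eq_chain (form_key : String) : make_series_col form_key = chainA form_key := by
  simp only [make_series_col, loopA, typeDict, kc_pp, kc_vp, kc_vl, kc_vh, kc_hp, kc_hl, kc_hh, kc_lp, kc_ll, Bool.false_eq_true,
    if_true, if_false, ite_self, chainA]

theorem b_eq_chain (form_key : String) : make_series_col_alt form_key = chainB form_key := by
  rw [make_series_col_alt, scoreDict_eq]
  simp only [PySem.Dict.get?_mk_cons]
  rw [pvBeqComm "age" form_key, pvBeqComm "gender" form_key, pvBeqComm "current_edu_level" form_key, pvBeqComm "highest_edu_level" form_key, pvBeqComm "number_of_units" form_key, pvBeqComm "building_age" form_key, pvBeqComm "ownership_type" form_key, pvBeqComm "number_of_rooms" form_key, pvBeqComm "number_of_vehicles" form_key, pvBeqComm "marital_status_checkbox" form_key, pvBeqComm "school_level" form_key, pvBeqComm "night_life_importance" form_key, pvBeqComm "noise_level_checkbox" form_key, pvBeqComm "crime_level_checkbox" form_key]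
  rfl

-- ===== VERDICT (by name: the statement is the Claim_ definition above) =====
theorem make_series_col_spec : Claim_equal_make_series_col := by
  intro form_key _
  unfold Spec_make_series_col
  rw [a_eq_chain form_key, b_eq_chain form_key]
  simp only [chainA, chainB, List.contains, List.elem]
  rcases Bool.dichotomy (form_key == "age") with h0 | h0
  case inr => simp only [h0]; rfl
  simp only [h0]
  rcases Bool.dichotomy (form_key == "gender") with h1 | h1
  case inr => simp only [h1]; rfl
  simp only [h1]
  rcases Bool.dichotomy (form_key == "current_edu_level") with h2 | h2
  case inr => simp only [h2]; rfl
  simp only [h2]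
  rcases Bool.dichotomy (form_key == "highest_edu_level") with h3 | h3
  case inr => simp only [h3]; rfl
  simp only [h3]
  rcases Bool.dichotomy (form_key == "number_of_units") with h4 | h4
  case inr => simp only [h4]; rfl
  simp only [h4]
  rcases Bool.dichotomy (form_key == "building_age") with h5 | h5
  case inr => simp only [h5]; rfl
  simp only [h5]
  rcases Bool.dichotomy (form_key == "ownership_type") with h6 | h6
  case inr => simp only [h6]; rfl
  simp only [h6]
  rcases Bool.dichotomy (form_key == "number_of_rooms") with h7 | h7
  case inr => simp only [h7]; rfl
  simp only [h7]
  rcases Bool.dichotomy (form_key == "number_of_vehicles") with h8 | h8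
  case inr => simp only [h8]; rfl
  simp only [h8]
  rcases Bool.dichotomy (form_key == "marital_status_checkbox") with h9 | h9
  case inr => simp only [h9]; rfl
  simp only [h9]
  rcases Bool.dichotomy (form_key == "night_life_importance") with hn | hn
  case inr =>
    simp only [hn]
    rcases Bool.dichotomy (form_key == "school_level") with hs | hs
    case inr => simp only [hs]; rfl
    simp only [hs]; rfl
  simp only [hn]
  rcases Bool.dichotomy (form_key == "school_level") with hs | hs
  case inr => simp only [hs]; rfl
  simp only [hs]
  rcases Bool.dichotomy (form_key == "noise_level_checkbox") with hno | hno
  case inr => simp only [hno]; rfl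
  simp only [hno]
  rcases Bool.dichotomy (form_key == "crime_level_checkbox") with hc | hc
  case inr => simp only [hc]; rfl
  simp only [hc]
  rfl
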